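-- pv_equiv track=rewrite | github.com/geokousis/Good-Wines | scripts_all/hot_5.py | region_has_no_indels
-- ===== SOURCE A (Python) =====
-- import bisect
--
-- def region_has_no_indels(chrom, start, end, variant_info_by_chr):
--     """
--     Check if the entire region [start, end] has no indel (or '*' event) records.
--     """
--     if chrom not in variant_info_by_chr:
--         return True
--     records = variant_info_by_chr[chrom]
--     idx = bisect.bisect_left(records, (start, -float('inf'), False))
--     while idx < len(records) and records[idx][0] <= end:
--         _, _, is_indel = records[idx]
--         if is_indel:
--             return False
--         idx += 1
--     return True
-- ===== SOURCE B (Python) =====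
-- def region_has_no_indels(chrom, start, end, variant_info_by_chr):
--     if chrom not in variant_info_by_chr:
--         return True
--     return not any(rec[2] for rec in variant_info_by_chr[chrom]
--                    if start <= rec[0] <= end)
-- ===== Notes on version B (the rewrite author's own statement) =====
-- stated objective: simpler
-- what changed: Removed the bisect binary search and index-bounded while-scan; B does one linear filtered pass over all records of the chromosome (not any(...)).
-- outside the precondition, e.g. on region_has_no_indels('c', 1, 1, {'c': [(10, 0, False), (1, 0, True)]}): A returns True, B returns False
import Mathlib
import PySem

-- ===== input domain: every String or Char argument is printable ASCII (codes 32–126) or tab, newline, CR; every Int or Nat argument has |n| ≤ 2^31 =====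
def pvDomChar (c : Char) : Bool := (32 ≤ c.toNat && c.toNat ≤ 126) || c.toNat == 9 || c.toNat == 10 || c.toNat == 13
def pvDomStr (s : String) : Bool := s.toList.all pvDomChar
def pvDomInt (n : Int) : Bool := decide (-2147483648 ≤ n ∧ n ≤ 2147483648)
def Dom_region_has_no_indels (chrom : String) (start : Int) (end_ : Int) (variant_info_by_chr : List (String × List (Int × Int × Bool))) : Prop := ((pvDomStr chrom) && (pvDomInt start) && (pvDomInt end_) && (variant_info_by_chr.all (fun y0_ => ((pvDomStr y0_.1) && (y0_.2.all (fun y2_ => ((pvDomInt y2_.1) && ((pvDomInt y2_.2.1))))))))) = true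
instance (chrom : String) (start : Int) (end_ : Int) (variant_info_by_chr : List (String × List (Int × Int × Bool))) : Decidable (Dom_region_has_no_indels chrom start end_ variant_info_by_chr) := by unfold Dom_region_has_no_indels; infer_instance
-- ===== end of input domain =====

-- B replaces A's bisect binary search + index-bounded scan with one linear filtered
-- pass over all records (objective: simpler). Pre_ restricts to record lists sorted
-- by position, which A's bisect assumes; on unsorted lists A's value is accidental.

-- ===== PORT A =====
-- bisect.bisect_left(records, (start, -inf, False)); since the second key component is
-- -float('inf'), Python's tuple '<' against the key is exactly 'first component < start'
-- (records carry int second components, always > -inf): exact on all admitted inputs.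
def pyBisectLeft (records : List (Int × Int × Bool)) (start : Int) (lo hi : Nat) : Nat :=
  if lo < hi then
    -- mid = (lo + hi) // 2, inlined
    match records[(lo + hi) / 2]? with
    | some r => if r.1 < start then pyBisectLeft records start ((lo + hi) / 2 + 1) hi
                else pyBisectLeft records start lo ((lo + hi) / 2)
    | none => lo   -- unreachable: bisect is always called with hi ≤ records.length
  else lo
termination_by hi - lo
decreasing_by all_goals omega

-- the 'while idx < len(records) and records[idx][0] <= end' loop
def scanA (records : List (Int × Int × Bool)) (end_ : Int) (idx : Nat) : Bool :=
  if h : idx < records.length then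
    let r := records[idx]
    if r.1 ≤ end_ then
      if r.2.2 then false else scanA records end_ (idx + 1)
    else true
  else true
termination_by records.length - idx

def region_has_no_indels (chrom : String) (start : Int) (end_ : Int) (variant_info_by_chr : List (String × List (Int × Int × Bool))) : Bool :=
  match (PySem.Dict.mk variant_info_by_chr).get? chrom with
  | none => true
  | some records => scanA records end_ (pyBisectLeft records start 0 records.length)

-- ===== PORT B =====
def region_has_no_indels_alt (chrom : String) (start : Int) (end_ : Int) (variant_info_by_chr : List (String × List (Int × Int × Bool))) : Bool :=
  match (PySem.Dict.mk variant_info_by_chr).get? chrom with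
  | none => true
  | some recs => !(recs.any (fun r => (decide (start ≤ r.1) && decide (r.1 ≤ end_)) && r.2.2))

-- ===== PRECONDITION & SPEC =====
-- Pre_ excludes inputs whose looked-up record list is not sorted by position: A's bisect
-- assumes sortedness and its result on unsorted lists is an accident of binary search.
def Pre_region_has_no_indels (chrom : String) (start : Int) (end_ : Int) (variant_info_by_chr : List (String × List (Int × Int × Bool))) : Prop :=
  (((PySem.Dict.mk variant_info_by_chr).get? chrom).getD []).Pairwise (fun a b => a.1 ≤ b.1)
instance (chrom : String) (start : Int) (end_ : Int) (variant_info_by_chr : List (String × List (Int × Int × Bool))) : Decidable (Pre_region_has_no_indels chrom start end_ variant_info_by_chr) := by unfold Pre_region_has_no_indels; infer_instance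

def pvWitness_region_has_no_indels : String × Int × Int × (List (String × List (Int × Int × Bool))) :=
  ("c", 0, 10, [("c", [(1, 2, false), (3, 0, true)])])

def Spec_region_has_no_indels (chrom : String) (start : Int) (end_ : Int) (variant_info_by_chr : List (String × List (Int × Int × Bool))) (out : Bool) : Prop := out = region_has_no_indels_alt chrom start end_ variant_info_by_chr
instance (chrom : String) (start : Int) (end_ : Int) (variant_info_by_chr : List (String × List (Int × Int × Bool))) (out : Bool) : Decidable (Spec_region_has_no_indels chrom start end_ variant_info_by_chr out) := by unfold Spec_region_has_no_indels; infer_instance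

-- ===== CLAIM (what is proved, stated in full; the proofs are below) =====
def Claim_equal_region_has_no_indels : Prop := ∀ (chrom : String) (start : Int) (end_ : Int) (variant_info_by_chr : List (String × List (Int × Int × Bool))), Dom_region_has_no_indels chrom start end_ variant_info_by_chr → Pre_region_has_no_indels chrom start end_ variant_info_by_chr → Spec_region_has_no_indels chrom start end_ variant_info_by_chr (region_has_no_indels chrom start end_ variant_info_by_chr)

-- ===== LEMMAS AND PROOFS =====

-- sortedness in index form
theorem sorted_getElem {recs : List (Int × Int × Bool)}
    (hs : recs.Pairwise (fun a b => a.1 ≤ b.1)) {i j : Nat}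
    (hij : i ≤ j) (hj : j < recs.length) :
    (recs[i]'(lt_of_le_of_lt hij hj)).1 ≤ (recs[j]).1 := by
  rcases Nat.lt_or_eq_of_le hij with h | h
  · exact (List.pairwise_iff_getElem.mp hs) i j _ hj h
  · subst h; exact le_rfl

theorem pyBisectLeft_spec (recs : List (Int × Int × Bool)) (start : Int)
    (hs : recs.Pairwise (fun a b => a.1 ≤ b.1)) (lo hi : Nat)
    (hle : lo ≤ hi) (hhi : hi ≤ recs.length)
    (hbelow : ∀ j (hj : j < recs.length), j < lo → (recs[j]).1 < start)
    (habove : ∀ j (hj : j < recs.length), hi ≤ j → start ≤ (recs[j]).1) :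
    lo ≤ pyBisectLeft recs start lo hi ∧ pyBisectLeft recs start lo hi ≤ hi ∧
    (∀ j (hj : j < recs.length), j < pyBisectLeft recs start lo hi → (recs[j]).1 < start) ∧
    (∀ j (hj : j < recs.length), pyBisectLeft recs start lo hi ≤ j → start ≤ (recs[j]).1) := by
  rw [pyBisectLeft]
  by_cases hlt : lo < hi
  · rw [if_pos hlt]
    have hmidlt : (lo + hi) / 2 < recs.length := by omega
    rw [List.getElem?_eq_getElem hmidlt]
    simp only
    by_cases hcmp : (recs[(lo + hi) / 2]).1 < start
    · rw [if_pos hcmp]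
      have hrec := pyBisectLeft_spec recs start hs ((lo + hi) / 2 + 1) hi
        (by omega) hhi
        (fun j hj hjlt => by
          have : (recs[j]).1 ≤ (recs[(lo + hi) / 2]).1 :=
            sorted_getElem hs (by omega) hmidlt
          omega)
        habove
      exact ⟨by omega, hrec.2.1, hrec.2.2.1, hrec.2.2.2⟩
    · rw [if_neg hcmp]
      have hrec := pyBisectLeft_spec recs start hs lo ((lo + hi) / 2)
        (by omega) (by omega) hbelow
        (fun j hj hjge => by
          have : (recs[(lo + hi) / 2]).1 ≤ (recs[j]).1 :=
            sorted_getElem hs hjge hj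
          omega)
      exact ⟨hrec.1, by omega, hrec.2.2.1, hrec.2.2.2⟩
  · rw [if_neg hlt]
    have heq : lo = hi := by omega
    exact ⟨le_rfl, by omega, fun j hj hjlt => hbelow j hj hjlt,
           fun j hj hjge => habove j hj (by omega)⟩
termination_by hi - lo
decreasing_by all_goals omega

theorem scanA_false_iff (recs : List (Int × Int × Bool)) (end_ : Int)
    (hs : recs.Pairwise (fun a b => a.1 ≤ b.1)) (i : Nat) :
    scanA recs end_ i = false ↔
      ∃ j, ∃ hj : j < recs.length, i ≤ j ∧ (recs[j]).1 ≤ end_ ∧ (recs[j]).2.2 = true := by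
  rw [scanA]
  by_cases h : i < recs.length
  · rw [dif_pos h]
    simp only
    by_cases hle : (recs[i]).1 ≤ end_
    · rw [if_pos hle]
      by_cases hind : (recs[i]).2.2 = true
      · rw [if_pos hind]
        exact ⟨fun _ => ⟨i, h, le_rfl, hle, hind⟩, fun _ => rfl⟩
      · rw [if_neg hind, scanA_false_iff recs end_ hs (i + 1)]
        constructor
        · rintro ⟨j, hj, hij, hjle, hjind⟩
          exact ⟨j, hj, by omega, hjle, hjind⟩
        · rintro ⟨j, hj, hij, hjle, hjind⟩
          refine ⟨j, hj, ?_, hjle, hjind⟩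
          rcases Nat.lt_or_eq_of_le hij with h' | h'
          · omega
          · exfalso; apply hind; subst h'; exact hjind
    · rw [if_neg hle]
      constructor
      · intro habs; cases habs
      · rintro ⟨j, hj, hij, hjle, _⟩
        exfalso
        have : (recs[i]).1 ≤ (recs[j]).1 := sorted_getElem hs hij hj
        omega
  · rw [dif_neg h]
    constructor
    · intro habs; cases habs
    · rintro ⟨j, hj, hij, _, _⟩; omega
termination_by recs.length - i
decreasing_by omega

theorem region_has_no_indels_spec : Claim_equal_region_has_no_indels := by
  intro chrom start end_ d _ hpre
  unfold Spec_region_has_no_indels region_has_no_indels region_has_no_indels_alt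
  cases hget : (PySem.Dict.mk d).get? chrom with
  | none => rfl
  | some recs =>
    simp only
    have hs : recs.Pairwise (fun a b => a.1 ≤ b.1) := by
      unfold Pre_region_has_no_indels at hpre
      rwa [hget] at hpre
    have hspec := pyBisectLeft_spec recs start hs 0 recs.length
      (Nat.zero_le _) le_rfl
      (fun j hj hjlt => absurd hjlt (Nat.not_lt_zero j))
      (fun j hj hjge => absurd hj (by omega))
    set i := pyBisectLeft recs start 0 recs.length with hi
    have hanyiff : (recs.any fun r => (decide (start ≤ r.1) && decide (r.1 ≤ end_)) && r.2.2) = true ↔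
        ∃ j, ∃ hj : j < recs.length, start ≤ (recs[j]).1 ∧ (recs[j]).1 ≤ end_ ∧ (recs[j]).2.2 = true := by
      rw [List.any_eq_true]
      constructor
      · rintro ⟨r, hr, hp⟩
        obtain ⟨j, hj, hrj⟩ := List.mem_iff_getElem.mp hr
        simp only [Bool.and_eq_true, decide_eq_true_eq] at hp
        exact ⟨j, hj, by rw [hrj]; exact hp.1.1, by rw [hrj]; exact hp.1.2, by rw [hrj]; exact hp.2⟩
      · rintro ⟨j, hj, h1, h2, h3⟩
        refine ⟨recs[j], List.getElem_mem hj, ?_⟩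
        simp only [Bool.and_eq_true, decide_eq_true_eq]
        exact ⟨⟨h1, h2⟩, h3⟩
    cases hany : (recs.any fun r => (decide (start ≤ r.1) && decide (r.1 ≤ end_)) && r.2.2) with
    | true =>
      obtain ⟨j, hj, h1, h2, h3⟩ := hanyiff.mp hany
      have hij : i ≤ j := by
        by_contra hc
        have := hspec.2.2.1 j hj (by omega)
        omega
      have : scanA recs end_ i = false :=
        (scanA_false_iff recs end_ hs i).mpr ⟨j, hj, hij, h2, h3⟩
      simp [this]
    | false =>
      have : scanA recs end_ i = true := by
        by_contra hc
        have hfalse : scanA recs end_ i = false := by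
          cases hval : scanA recs end_ i
          · rfl
          · exact absurd hval hc
        obtain ⟨j, hj, hij, h2, h3⟩ := (scanA_false_iff recs end_ hs i).mp hfalse
        have h1 : start ≤ (recs[j]).1 := hspec.2.2.2 j hj hij
        have := hanyiff.mpr ⟨j, hj, h1, h2, h3⟩
        rw [hany] at this; cases this
      simp [this]
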